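-- pv_equiv track=rewrite | github.com/jhleepidl/graph-of-context-ui | backend/app/services/graph.py | replace_ids_in_order
-- ===== SOURCE A (Python) =====
-- from typing import Any, Dict, List, Optional, Sequence, Tuple
--
-- def replace_ids_in_order(active_ids: List[str], old_id: str, new_ids: List[str]) -> List[str]:
--     replaced = False
--     expanded: List[str] = []
--
--     for nid in active_ids:
--         if nid == old_id:
--             if not replaced:
--                 expanded.extend(new_ids)
--                 replaced = True
--             continue
--         expanded.append(nid)
--
--     if not replaced:
--         expanded.extend(new_ids)
--
--     seen = set()
--     out: List[str] = []
--     for nid in expanded: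
--         if nid in seen:
--             continue
--         seen.add(nid)
--         out.append(nid)
--     return out
-- ===== SOURCE B (Python) =====
-- def replace_ids_in_order(active_ids, old_id, new_ids):
--     # Expand EVERY occurrence of old_id (plus one sentinel occurrence appended at
--     # the end, which covers the absent case); the order-preserving dedup collapses
--     # the redundant copies, so no 'replaced' flag or index search is needed.
--     expanded = [y
--                 for x in active_ids + [old_id]
--                 for y in (new_ids if x == old_id else [x])]
--     return list(dict.fromkeys(expanded))
-- ===== Notes on version B (the rewrite author's own statement) =====
-- stated objective: alternative
-- what changed: B removes A's 'replaced' flag and first-occurrence logic altogether: it expands every occurrence of old_id (plus one sentinel occurrence appended at the end, which covers the absent case) and relies on the order-preserving dedup (dict.fromkeys) to collapse the redundant copies.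
import Mathlib
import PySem

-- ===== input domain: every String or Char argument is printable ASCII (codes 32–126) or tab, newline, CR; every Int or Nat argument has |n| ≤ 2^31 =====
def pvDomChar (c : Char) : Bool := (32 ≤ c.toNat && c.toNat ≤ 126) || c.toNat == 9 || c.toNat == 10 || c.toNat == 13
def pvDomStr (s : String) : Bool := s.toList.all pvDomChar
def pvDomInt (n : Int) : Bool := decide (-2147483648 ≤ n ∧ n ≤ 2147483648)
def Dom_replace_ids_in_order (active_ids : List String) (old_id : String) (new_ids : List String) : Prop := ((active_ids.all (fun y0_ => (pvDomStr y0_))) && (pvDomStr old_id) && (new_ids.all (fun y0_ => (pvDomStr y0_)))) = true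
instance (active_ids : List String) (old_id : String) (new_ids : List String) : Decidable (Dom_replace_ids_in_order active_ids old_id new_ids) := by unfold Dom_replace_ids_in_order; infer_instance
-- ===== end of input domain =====

-- B drops A's 'replaced' flag entirely: it expands EVERY occurrence of old_id (plus one
-- sentinel occurrence appended at the end, covering the absent case) and lets the
-- order-preserving dedup collapse the redundant copies; objective: alternative.

-- ===== PORT A =====
-- the replacement sweep with its 'replaced' sentinel, as a fold over (replaced, expanded)
def pvAStep (old_id : String) (new_ids : List String) (st : Bool × List String) (nid : String) : Bool × List String :=
  if nid = old_id then
    if st.1 = false then (true, st.2 ++ new_ids) else st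
  else (st.1, st.2 ++ [nid])

-- the dedup loop over (seen, out)
def pvADedupStep (p : PySem.Set String × List String) (nid : String) : PySem.Set String × List String :=
  if PySem.Set.contains p.1 nid then p else (PySem.Set.add p.1 nid, p.2 ++ [nid])

def replace_ids_in_order (active_ids : List String) (old_id : String) (new_ids : List String) : List String :=
  let st := active_ids.foldl (pvAStep old_id new_ids) (false, [])
  let expanded := if st.1 = false then st.2 ++ new_ids else st.2
  (expanded.foldl pvADedupStep (PySem.Set.empty, [])).2

-- ===== PORT B =====
def replace_ids_in_order_alt (active_ids : List String) (old_id : String) (new_ids : List String) : List String :=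
  let expanded : List String :=
    (active_ids ++ [old_id]).flatMap (fun x => if x = old_id then new_ids else [x])
  PySem.List.dedup expanded

-- ===== PRECONDITION & SPEC =====
def Spec_replace_ids_in_order (active_ids : List String) (old_id : String) (new_ids : List String) (out : List String) : Prop := out = replace_ids_in_order_alt active_ids old_id new_ids
instance (active_ids : List String) (old_id : String) (new_ids : List String) (out : List String) : Decidable (Spec_replace_ids_in_order active_ids old_id new_ids out) := by unfold Spec_replace_ids_in_order; infer_instance

-- ===== CLAIM (what is proved, stated in full; the proofs are below) =====
def Claim_equal_replace_ids_in_order : Prop := ∀ (active_ids : List String) (old_id : String) (new_ids : List String), Dom_replace_ids_in_order active_ids old_id new_ids → Spec_replace_ids_in_order active_ids old_id new_ids (replace_ids_in_order active_ids old_id new_ids)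

-- ===== LEMMAS AND PROOFS =====

-- A's dedup loop, started on a state whose two components agree, keeps them equal
-- and computes Set.add-folds, i.e. dict.fromkeys order-preserving dedup.
theorem pvDedup_inv (xs : List String) (s : PySem.Set String) :
    xs.foldl pvADedupStep (s, (s : List String)) = (xs.foldl PySem.Set.add s, xs.foldl PySem.Set.add s) := by
  induction xs generalizing s with
  | nil => rfl
  | cons x xs ih =>
      have hstep : pvADedupStep (s, (s : List String)) x = (PySem.Set.add s x, PySem.Set.add s x) := by
        simp only [pvADedupStep, PySem.Set.add, PySem.Set.contains]
        split_ifs <;> rfl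
      rw [List.foldl_cons, List.foldl_cons, hstep, ih]

theorem pvDedup_eq (xs : List String) :
    (xs.foldl pvADedupStep (PySem.Set.empty, [])).2 = PySem.List.dedup xs := by
  rw [PySem.List.dedup_eq_ofList, PySem.Set.ofList_eq_foldl]
  have h := pvDedup_inv xs PySem.Set.empty
  exact congrArg Prod.snd h

-- once replaced, the sweep just filters out further occurrences of old_id
theorem pvLoopT (old_id : String) (new_ids : List String) (xs : List String) (pre : List String) :
    xs.foldl (pvAStep old_id new_ids) (true, pre) = (true, pre ++ xs.filter (fun x => x ≠ old_id)) := by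
  induction xs generalizing pre with
  | nil => simp
  | cons x xs ih =>
      by_cases hx : x = old_id
      · subst hx
        have hstep : pvAStep x new_ids (true, pre) x = (true, pre) := by
          simp [pvAStep]
        rw [List.foldl_cons, hstep, ih]
        simp
      · have hstep : pvAStep old_id new_ids (true, pre) x = (true, pre ++ [x]) := by
          simp [pvAStep, hx]
        rw [List.foldl_cons, hstep, ih]
        simp [hx]

-- before a match, the sweep just copies
theorem pvLoopF_notmem (old_id : String) (new_ids : List String) (xs : List String) (pre : List String)
    (h : old_id ∉ xs) :
    xs.foldl (pvAStep old_id new_ids) (false, pre) = (false, pre ++ xs) := by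
  induction xs generalizing pre with
  | nil => simp
  | cons x xs ih =>
      have hx : x ≠ old_id := fun he => h (he ▸ List.mem_cons_self)
      have h' : old_id ∉ xs := fun hm => h (List.mem_cons_of_mem _ hm)
      have hstep : pvAStep old_id new_ids (false, pre) x = (false, pre ++ [x]) := by
        simp [pvAStep, hx]
      rw [List.foldl_cons, hstep, ih _ h']
      simp

-- split at the first occurrence: the sweep produces prefix ++ new_ids ++ filtered tail
theorem pvLoopF_split (old_id : String) (new_ids : List String) (pre suf : List String)
    (hnot : old_id ∉ pre) :
    (pre ++ old_id :: suf).foldl (pvAStep old_id new_ids) (false, []) =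
      (true, pre ++ new_ids ++ suf.filter (fun x => x ≠ old_id)) := by
  rw [List.foldl_append, pvLoopF_notmem old_id new_ids pre [] hnot]
  have hstep : pvAStep old_id new_ids (false, [] ++ pre) old_id = (true, ([] ++ pre) ++ new_ids) := by
    simp [pvAStep]
  rw [List.foldl_cons, hstep, pvLoopT]
  simp

-- Set.add of an already-present element is a no-op
theorem pvAdd_mem (s : PySem.Set String) (x : String) (hx : x ∈ s) : PySem.Set.add s x = s := by
  simp [PySem.Set.add, PySem.Set.contains, hx]

-- folding already-seen elements into the seen set is a no-op
theorem pvAbsorb (v : List String) (s : PySem.Set String) (h : ∀ x ∈ v, x ∈ s) :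
    v.foldl PySem.Set.add s = s := by
  induction v generalizing s with
  | nil => rfl
  | cons x v ih =>
      rw [List.foldl_cons, pvAdd_mem s x (h x List.mem_cons_self)]
      exact ih s (fun y hy => h y (List.mem_cons_of_mem _ hy))

-- membership is preserved by the add-fold
theorem pvMemFold_of_mem_init (l : List String) (s : PySem.Set String) (x : String) (hx : x ∈ s) :
    x ∈ l.foldl PySem.Set.add s := by
  induction l generalizing s with
  | nil => exact hx
  | cons y l ih =>
      exact ih (PySem.Set.add s y) ((PySem.Set.mem_add _ _ _).mpr (Or.inl hx))

-- folded elements end up in the add-fold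
theorem pvMemFold_of_mem_list (l : List String) (s : PySem.Set String) (x : String) (hx : x ∈ l) :
    x ∈ l.foldl PySem.Set.add s := by
  induction l generalizing s with
  | nil => cases hx
  | cons y l ih =>
      rcases List.mem_cons.mp hx with h | h
      · exact pvMemFold_of_mem_init l _ x ((PySem.Set.mem_add _ _ _).mpr (Or.inr h))
      · exact ih _ h

-- once every element of new_ids is already seen, expanding each old_id occurrence to
-- new_ids feeds the seen-fold exactly like simply dropping those occurrences
theorem pvExpandTail (old_id : String) (new_ids : List String) (t : List String)
    (s : PySem.Set String) (h : ∀ y ∈ new_ids, y ∈ s) :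
    (t.flatMap (fun x => if x = old_id then new_ids else [x])).foldl PySem.Set.add s =
      (t.filter (fun x => x ≠ old_id)).foldl PySem.Set.add s := by
  induction t generalizing s with
  | nil => rfl
  | cons x t ih =>
      by_cases hx : x = old_id
      · subst hx
        have e1 : (x :: t).flatMap (fun z => if z = x then new_ids else [z]) =
            new_ids ++ t.flatMap (fun z => if z = x then new_ids else [z]) := by simp
        have e2 : (x :: t).filter (fun z => z ≠ x) = t.filter (fun z => z ≠ x) := by simp
        rw [e1, e2, List.foldl_append, pvAbsorb new_ids s h]
        exact ih s h
      · have e1 : (x :: t).flatMap (fun z => if z = old_id then new_ids else [z]) =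
            x :: t.flatMap (fun z => if z = old_id then new_ids else [z]) := by simp [hx]
        have e2 : (x :: t).filter (fun z => z ≠ old_id) = x :: t.filter (fun z => z ≠ old_id) := by
          simp [hx]
        rw [e1, e2, List.foldl_cons, List.foldl_cons]
        exact ih (PySem.Set.add s x)
          (fun y hy => (PySem.Set.mem_add _ _ _).mpr (Or.inl (h y hy)))

-- a list without old_id is unchanged by the expansion
theorem pvExpandId (old_id : String) (new_ids : List String) (l : List String)
    (h : old_id ∉ l) :
    l.flatMap (fun x => if x = old_id then new_ids else [x]) = l := by
  induction l with
  | nil => rfl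
  | cons x l ih =>
      have hx : x ≠ old_id := fun he => h (he ▸ List.mem_cons_self)
      simp only [List.flatMap_cons, if_neg hx, List.singleton_append]
      rw [ih (fun hm => h (List.mem_cons_of_mem _ hm))]

-- ===== VERDICT (by name: the statement is the Claim_ definition above) =====
theorem replace_ids_in_order_spec : Claim_equal_replace_ids_in_order := by
  intro active_ids old_id new_ids _
  unfold Spec_replace_ids_in_order replace_ids_in_order replace_ids_in_order_alt
  by_cases hmem : old_id ∈ active_ids
  · rcases Option.isSome_iff_exists.mp
      (((PySem.List.index?_isSome_iff active_ids old_id)).mpr hmem) with ⟨i, hi⟩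
    rcases (PySem.List.index?_eq_some_iff active_ids old_id i).mp hi with ⟨pre, suf, hsplit, _, hnot⟩
    subst hsplit
    rw [pvLoopF_split old_id new_ids pre suf hnot]
    simp only [Bool.true_eq_false, if_false]
    rw [pvDedup_eq, PySem.List.dedup_eq_ofList, PySem.List.dedup_eq_ofList,
        PySem.Set.ofList_eq_foldl, PySem.Set.ofList_eq_foldl]
    have hflat :
        ((pre ++ old_id :: suf) ++ [old_id]).flatMap (fun x => if x = old_id then new_ids else [x]) =
          pre ++ new_ids ++
            (suf.flatMap (fun x => if x = old_id then new_ids else [x]) ++ new_ids) := by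
      rw [List.flatMap_append, List.flatMap_append, List.flatMap_cons,
          pvExpandId old_id new_ids pre hnot]
      simp
    rw [hflat]
    simp only [List.foldl_append, List.append_assoc]
    set s0 := new_ids.foldl PySem.Set.add (pre.foldl PySem.Set.add ([] : PySem.Set String)) with hs0
    have hnew : ∀ y ∈ new_ids, y ∈ s0 := fun y hy => pvMemFold_of_mem_list new_ids _ y hy
    rw [pvExpandTail old_id new_ids suf s0 hnew]
    rw [pvAbsorb new_ids _ (fun y hy => pvMemFold_of_mem_init _ _ y (hnew y hy))]
  · rw [pvLoopF_notmem old_id new_ids active_ids [] hmem]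
    simp only []
    rw [pvDedup_eq]
    congr 1
    rw [List.flatMap_append, pvExpandId old_id new_ids active_ids hmem]
    simp
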